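-- pv_equiv track=rewrite | github.com/cboyd0319/JobSentinel | src/jsa/auto_update.py | _is_security_update
-- ===== SOURCE A (Python) =====
-- def _is_security_update(body: str) -> bool:
--     """Check if release is a security update.
--
--     Args:
--         body: Release notes body
--
--     Returns:
--         True if security update
--     """
--     security_keywords = [
--         "security",
--         "vulnerability",
--         "cve",
--         "exploit",
--         "malicious",
--         "patch",
--         "critical update",
--     ]
--     body_lower = body.lower()
--     return any(keyword in body_lower for keyword in security_keywords)
-- ===== SOURCE B (Python) =====
-- _KEYWORDS = [
--     "security",
--     "vulnerability",
--     "cve",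
--     "exploit",
--     "malicious",
--     "patch",
--     "critical update",
-- ]
--
--
-- def _is_security_update(body: str) -> bool:
--     """Single left-to-right pass: simulate the multi-pattern NFA, keeping the
--     set of partially matched keyword suffixes and extending/starting them at
--     each character."""
--     active = []  # suffixes of keywords still to be matched at this point
--     for ch in body.lower():
--         nxt = []
--         for s in active + _KEYWORDS:
--             if s[0] == ch:
--                 rest = s[1:]
--                 if not rest:
--                     return True
--                 nxt.append(rest)
--         active = nxt
--     return False
-- ===== Notes on version B (the rewrite author's own statement) =====
-- stated objective: alternative
-- what changed: B replaces the per-keyword any()-substring loop by a single left-to-right pass that simulates the multi-pattern NFA: it maintains the list of partially matched keyword suffixes, advancing or starting matches at each character and returning True when a suffix is consumed.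
import Mathlib
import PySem

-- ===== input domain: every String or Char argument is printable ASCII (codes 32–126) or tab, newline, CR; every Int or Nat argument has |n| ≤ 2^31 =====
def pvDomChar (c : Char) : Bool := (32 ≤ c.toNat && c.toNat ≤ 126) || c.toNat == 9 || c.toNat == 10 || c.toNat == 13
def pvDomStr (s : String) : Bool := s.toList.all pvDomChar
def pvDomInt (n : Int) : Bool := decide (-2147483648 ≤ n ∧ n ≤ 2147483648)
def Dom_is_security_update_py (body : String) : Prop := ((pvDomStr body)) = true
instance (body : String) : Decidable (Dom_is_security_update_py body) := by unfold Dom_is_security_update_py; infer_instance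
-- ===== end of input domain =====

-- B replaces A's per-keyword substring loop by one left-to-right pass simulating the
-- multi-pattern NFA (a list of partially matched keyword suffixes); same boolean result.


-- ===== PORT A =====
def secKeywords : List String :=
  ["security", "vulnerability", "cve", "exploit", "malicious", "patch", "critical update"]

def is_security_update_py (body : String) : Bool :=
  let body_lower := PySem.Str.lower body
  secKeywords.any (fun keyword => PySem.Str.isIn keyword body_lower)

-- ===== PORT B =====
-- B's keyword list, as char lists (Source B's _KEYWORDS)
def secKW : List (List Char) :=
  ["security".toList, "vulnerability".toList, "cve".toList, "exploit".toList,
   "malicious".toList, "patch".toList, "critical update".toList]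

-- Source B's loop: `active` is the list of keyword suffixes still being matched;
-- at each char, a candidate equal to [c] completes a match (the early `return True`),
-- otherwise candidates whose head is c survive with their tail.
def secStep : List (List Char) → List Char → Bool
  | _, [] => false
  | active, c :: rest =>
      let cands := active ++ secKW
      if cands.any (fun s => s = [c]) then true
      else
        secStep (cands.filterMap (fun s =>
          match s with
          | [] => none
          | h :: t => if h = c then some t else none)) rest

def is_security_update_py_alt (body : String) : Bool :=
  secStep [] (PySem.Chars.lower body.toList)

-- ===== PRECONDITION & SPEC =====
def Spec_is_security_update_py (body : String) (out : Bool) : Prop := out = is_security_update_py_alt body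
instance (body : String) (out : Bool) : Decidable (Spec_is_security_update_py body out) := by unfold Spec_is_security_update_py; infer_instance

-- ===== CLAIM (what is proved, stated in full; the proofs are below) =====
def Claim_equal_is_security_update_py : Prop := ∀ (body : String), Dom_is_security_update_py body → Spec_is_security_update_py body (is_security_update_py body)

-- ===== LEMMAS AND PROOFS =====

lemma secKW_ne_nil : ∀ k ∈ secKW, k ≠ [] := by decide

-- invariant of B's scan: success iff some active suffix completes at the head,
-- or some keyword occurs somewhere in the remaining text
lemma secStep_iff (cs : List Char) : ∀ (active : List (List Char)),
    (∀ s ∈ active, s ≠ []) →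
    (secStep active cs = true ↔
      (∃ s ∈ active, s <+: cs) ∨ ∃ k ∈ secKW, ∃ j, k <+: cs.drop j) := by
  induction cs with
  | nil =>
      intro active hne
      simp only [secStep, List.drop_nil]
      constructor
      · intro h; cases h
      · rintro (⟨s, hs, hp⟩ | ⟨k, hk, _, hp⟩)
        · exact absurd (List.prefix_nil.mp hp) (hne s hs)
        · exact absurd (List.prefix_nil.mp hp) (secKW_ne_nil k hk)
  | cons c rest ih =>
      intro active hne
      simp only [secStep]
      by_cases hhit : (active ++ secKW).any (fun s => s = [c]) = true
      · simp only [hhit, if_true, true_iff]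
        obtain ⟨s, hs, hsc⟩ := List.any_eq_true.mp hhit
        have hsc : s = [c] := by simpa using hsc
        rcases List.mem_append.mp hs with h | h
        · exact Or.inl ⟨s, h, by rw [hsc]; exact ⟨rest, rfl⟩⟩
        · exact Or.inr ⟨s, h, 0, by rw [hsc]; exact ⟨rest, rfl⟩⟩
      · simp only [hhit, Bool.false_eq_true, if_false]
        have hno : ∀ s ∈ active ++ secKW, s ≠ [c] := by
          intro s hs heq
          exact hhit (List.any_eq_true.mpr ⟨s, hs, by simp [heq]⟩)
        set f : List Char → Option (List Char) := fun s =>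
          match s with
          | [] => none
          | h :: t => if h = c then some t else none with hf
        have hmem : ∀ t, t ∈ (active ++ secKW).filterMap f ↔ (c :: t) ∈ active ++ secKW := by
          intro t
          rw [List.mem_filterMap]
          constructor
          · rintro ⟨s, hs, hft⟩
            cases s with
            | nil => simp [hf] at hft
            | cons h t' =>
                simp only [hf] at hft
                by_cases hc : h = c
                · rw [if_pos hc] at hft
                  obtain rfl := Option.some.inj hft
                  subst hc
                  exact hs
                · rw [if_neg hc] at hft
                  cases hft
          · intro h; exact ⟨c :: t, h, by simp [hf]⟩
        have hne' : ∀ t ∈ (active ++ secKW).filterMap f, t ≠ [] := by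
          intro t ht hteq
          subst hteq
          exact hno _ ((hmem []).mp ht) rfl
        rw [ih _ hne']
        constructor
        · rintro (⟨t, ht, hp⟩ | ⟨k, hk, j, hp⟩)
          · rcases List.mem_append.mp ((hmem t).mp ht) with h | h
            · exact Or.inl ⟨c :: t, h, List.cons_prefix_cons.mpr ⟨rfl, hp⟩⟩
            · exact Or.inr ⟨c :: t, h, 0, List.cons_prefix_cons.mpr ⟨rfl, hp⟩⟩
          · exact Or.inr ⟨k, hk, j + 1, by simpa using hp⟩
        · rintro (⟨s, hs, hp⟩ | ⟨k, hk, j, hp⟩)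
          · have hsne : s ≠ [] := hne s hs
            match s, hsne with
            | h :: t, _ =>
                obtain ⟨rfl, hp'⟩ := List.cons_prefix_cons.mp hp
                exact Or.inl ⟨t, (hmem t).mpr (List.mem_append.mpr (Or.inl hs)), hp'⟩
          · cases j with
            | zero =>
                have hkne : k ≠ [] := secKW_ne_nil k hk
                match k, hkne with
                | h :: t, _ =>
                    obtain ⟨rfl, hp'⟩ := List.cons_prefix_cons.mp hp
                    exact Or.inl ⟨t, (hmem t).mpr (List.mem_append.mpr (Or.inr hk)), hp'⟩
            | succ j => exact Or.inr ⟨k, hk, j, by simpa using hp⟩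

lemma secKW_eq_map : secKW = secKeywords.map String.toList := by decide

lemma secA_iff (body : String) :
    is_security_update_py body = true ↔
      ∃ a ∈ secKW, PySem.Chars.isIn a (PySem.Chars.lower body.toList) = true := by
  simp only [is_security_update_py, List.any_eq_true]
  constructor
  · rintro ⟨k, hk, hin⟩
    rw [PySem.Str.isIn_iff_infix, ← PySem.Chars.isIn_iff_infix, PySem.Str.toList_lower] at hin
    refine ⟨k.toList, ?_, hin⟩
    rw [secKW_eq_map]
    exact List.mem_map_of_mem hk
  · rintro ⟨a, ha, hin⟩
    rw [secKW_eq_map] at ha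
    obtain ⟨k, hk, rfl⟩ := List.mem_map.mp ha
    refine ⟨k, hk, ?_⟩
    rw [PySem.Str.isIn_iff_infix, ← PySem.Chars.isIn_iff_infix, PySem.Str.toList_lower]
    exact hin

-- ===== VERDICT (by name: the statement is the Claim_ definition above) =====
theorem is_security_update_py_spec : Claim_equal_is_security_update_py := by
  intro body _
  unfold Spec_is_security_update_py
  rw [Bool.eq_iff_iff]
  rw [secA_iff, is_security_update_py_alt,
    secStep_iff (PySem.Chars.lower body.toList) [] (by simp)]
  constructor
  · rintro ⟨a, ha, hin⟩
    rcases (PySem.Chars.exists_prefix_drop_iff_isIn a _).mpr hin with ⟨j, hp⟩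
    exact Or.inr ⟨a, ha, j, hp⟩
  · rintro (⟨s, hs, _⟩ | ⟨a, ha, j, hp⟩)
    · cases hs
    · exact ⟨a, ha, (PySem.Chars.exists_prefix_drop_iff_isIn a _).mp ⟨j, hp⟩⟩
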